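-- pv_equiv track=rewrite | github.com/LaxmiSaiPrasad/Vehicle-Routing-Problem---Tabu-Search | Objective_Value.py | Penalty_Sequence
-- ===== SOURCE A (Python) =====
-- def Penalty_Sequence(Array,Penalty_Value_1,Penalty_Value_2, Number_Of_Trucks):
--
--     penalty = 0
--
--     # Indices of warehouse
--     warehouse_index = [i for i in range(1,(2*Number_Of_Trucks)+1,1)]
--
--     if Array[0] not in warehouse_index:
--         penalty += Penalty_Value_1
--
--     if Array[-1] not in warehouse_index:
--         penalty += Penalty_Value_1
--
--     if Array[1] in warehouse_index:
--         penalty += Penalty_Value_1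
--
--     if Array[-2] in warehouse_index:
--         penalty += Penalty_Value_1
--
--     for i in range(len(Array)):
--         if i < (len(Array)-2):
--             A1 = Array[i]
--             A2 = Array[i+1]
--             A3 = Array[i+2]
--             if (A1 in warehouse_index) and             (A2 in warehouse_index) and (A3 in warehouse_index):
--                 penalty += Penalty_Value_2
--
--     return penalty
-- ===== SOURCE B (Python) =====
-- def Penalty_Sequence(Array, Penalty_Value_1, Penalty_Value_2, Number_Of_Trucks):
--     # warehouse indices are exactly the integers 1 .. 2*Number_Of_Trucks
--     def is_wh(x):
--         return 1 <= x <= 2 * Number_Of_Trucks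
--
--     penalty = 0
--     if not is_wh(Array[0]):
--         penalty += Penalty_Value_1
--     if not is_wh(Array[-1]):
--         penalty += Penalty_Value_1
--     if is_wh(Array[1]):
--         penalty += Penalty_Value_1
--     if is_wh(Array[-2]):
--         penalty += Penalty_Value_1
--
--     # one streaming pass: a run of k>=3 consecutive warehouse stops
--     # contains exactly k-2 windows of three
--     streak = 0
--     for x in Array:
--         streak = streak + 1 if is_wh(x) else 0
--         if streak >= 3:
--             penalty += Penalty_Value_2
--     return penalty
-- ===== Notes on version B (the rewrite author's own statement) =====
-- stated objective: simpler
-- what changed: The materialised warehouse-index list and the triple-indexing window scan are replaced by an integer range comparison and a single streaming pass maintaining a run-length counter (each streak position >= 3 is one window of three).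
import Mathlib
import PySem

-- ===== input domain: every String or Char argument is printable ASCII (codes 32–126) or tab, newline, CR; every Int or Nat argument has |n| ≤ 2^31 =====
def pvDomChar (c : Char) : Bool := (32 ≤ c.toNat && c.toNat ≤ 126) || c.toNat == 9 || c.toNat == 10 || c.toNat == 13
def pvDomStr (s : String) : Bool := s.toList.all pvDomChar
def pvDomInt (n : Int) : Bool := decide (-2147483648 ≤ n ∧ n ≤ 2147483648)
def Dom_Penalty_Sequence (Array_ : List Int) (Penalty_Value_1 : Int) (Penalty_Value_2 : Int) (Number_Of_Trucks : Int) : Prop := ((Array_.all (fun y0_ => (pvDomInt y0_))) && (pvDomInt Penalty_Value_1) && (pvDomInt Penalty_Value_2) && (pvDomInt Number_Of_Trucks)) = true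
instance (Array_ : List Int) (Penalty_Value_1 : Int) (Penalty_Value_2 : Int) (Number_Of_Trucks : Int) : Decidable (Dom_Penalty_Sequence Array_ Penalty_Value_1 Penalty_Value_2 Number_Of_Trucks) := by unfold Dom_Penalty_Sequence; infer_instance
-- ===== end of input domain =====

-- B replaces the materialised warehouse-index list and the triple-indexing window scan
-- by a range comparison and a single streaming run-length pass (objective: simpler).

-- ===== PORT A =====
-- Python A: builds warehouse_index = [1..2N], four boundary membership checks,
-- then for each i < len-2 tests the window (A[i],A[i+1],A[i+2]).
def Penalty_Sequence (Array_ : List Int) (Penalty_Value_1 : Int) (Penalty_Value_2 : Int) (Number_Of_Trucks : Int) : Int :=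
  let wh : List Int := PySem.List.pyRange 1 (2 * Number_Of_Trucks + 1) 1
  let g : Int → Int := fun i => PySem.List.pyGetD Array_ i 0   -- Pre_ guarantees every index used is in range
  let p0 : Int := 0
  let p1 := if g 0 ∈ wh then p0 else p0 + Penalty_Value_1
  let p2 := if g (-1) ∈ wh then p1 else p1 + Penalty_Value_1
  let p3 := if g 1 ∈ wh then p2 + Penalty_Value_1 else p2
  let p4 := if g (-2) ∈ wh then p3 + Penalty_Value_1 else p3
  (PySem.List.pyRange 0 (Array_.length : Int) 1).foldl
    (fun pen i =>
      if i < (Array_.length : Int) - 2 then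
        if g i ∈ wh ∧ g (i + 1) ∈ wh ∧ g (i + 2) ∈ wh then pen + Penalty_Value_2 else pen
      else pen) p4

-- ===== PORT B =====
def Penalty_Sequence_alt (Array_ : List Int) (Penalty_Value_1 : Int) (Penalty_Value_2 : Int) (Number_Of_Trucks : Int) : Int :=
  let isWh : Int → Bool := fun x => decide (1 ≤ x ∧ x ≤ 2 * Number_Of_Trucks)
  let g : Int → Int := fun i => PySem.List.pyGetD Array_ i 0
  let p0 : Int := 0
  let p1 := if isWh (g 0) then p0 else p0 + Penalty_Value_1
  let p2 := if isWh (g (-1)) then p1 else p1 + Penalty_Value_1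
  let p3 := if isWh (g 1) then p2 + Penalty_Value_1 else p2
  let p4 := if isWh (g (-2)) then p3 + Penalty_Value_1 else p3
  (Array_.foldl
    (fun st x =>
      let s := if isWh x then st.1 + 1 else 0
      (s, if 3 ≤ s then st.2 + Penalty_Value_2 else st.2)) ((0 : Int), p4)).2

-- ===== PRECONDITION & SPEC =====
-- Pre_ excludes lists of length < 2, on which Python A raises IndexError at the boundary checks.
def Pre_Penalty_Sequence (Array_ : List Int) (Penalty_Value_1 : Int) (Penalty_Value_2 : Int) (Number_Of_Trucks : Int) : Prop := 2 ≤ Array_.length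
instance (Array_ : List Int) (Penalty_Value_1 : Int) (Penalty_Value_2 : Int) (Number_Of_Trucks : Int) : Decidable (Pre_Penalty_Sequence Array_ Penalty_Value_1 Penalty_Value_2 Number_Of_Trucks) := by unfold Pre_Penalty_Sequence; infer_instance
def pvWitness_Penalty_Sequence : List Int × Int × Int × Int := ([1, 3, 1, 1, 2], 10, 5, 1)
def Spec_Penalty_Sequence (Array_ : List Int) (Penalty_Value_1 : Int) (Penalty_Value_2 : Int) (Number_Of_Trucks : Int) (out : Int) : Prop := out = Penalty_Sequence_alt Array_ Penalty_Value_1 Penalty_Value_2 Number_Of_Trucks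
instance (Array_ : List Int) (Penalty_Value_1 : Int) (Penalty_Value_2 : Int) (Number_Of_Trucks : Int) (out : Int) : Decidable (Spec_Penalty_Sequence Array_ Penalty_Value_1 Penalty_Value_2 Number_Of_Trucks out) := by unfold Spec_Penalty_Sequence; infer_instance

-- ===== CLAIM (what is proved, stated in full; the proofs are below) =====
def Claim_equal_Penalty_Sequence : Prop := ∀ (Array_ : List Int) (Penalty_Value_1 : Int) (Penalty_Value_2 : Int) (Number_Of_Trucks : Int), Dom_Penalty_Sequence Array_ Penalty_Value_1 Penalty_Value_2 Number_Of_Trucks → Pre_Penalty_Sequence Array_ Penalty_Value_1 Penalty_Value_2 Number_Of_Trucks → Spec_Penalty_Sequence Array_ Penalty_Value_1 Penalty_Value_2 Number_Of_Trucks (Penalty_Sequence Array_ Penalty_Value_1 Penalty_Value_2 Number_Of_Trucks)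

-- ===== LEMMAS AND PROOFS =====

-- number of windows of three consecutive warehouse stops (A's count, structurally)
def cntT (w : Int → Bool) : List Int → Nat
  | a :: b :: c :: r => (if w a && w b && w c then 1 else 0) + cntT w (b :: c :: r)
  | _ => 0

-- B's count: p, q say whether the previous-but-one / previous element were warehouse stops
def cnt (w : Int → Bool) (p q : Bool) : List Int → Nat
  | [] => 0
  | a :: r => (if p && q && w a then 1 else 0) + cnt w q (w a) r

lemma cnt_false_irrel (w : Int → Bool) (l : List Int) (p p' : Bool) :
    cnt w p false l = cnt w p' false l := by
  cases l <;> simp [cnt]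

lemma cnt_shift (w : Int → Bool) (l : List Int) : ∀ x y,
    cnt w (w x) (w y) l = cntT w (x :: y :: l) := by
  induction l with
  | nil => intro x y; simp [cnt, cntT]
  | cons a r ih => intro x y; simp [cnt, cntT, ih]

lemma cnt_start (w : Int → Bool) (l : List Int) : cnt w false false l = cntT w l := by
  match l with
  | [] => simp [cnt, cntT]
  | [x] => simp [cnt, cntT]
  | x :: y :: r => simp [cnt, cnt_shift]

-- B's streaming loop computes its starting penalty plus P2 per counted window
lemma loopB (P2 : Int) (w : Int → Bool) (l : List Int) : ∀ (s pen : Int), 0 ≤ s →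
    (l.foldl (fun st x =>
        let s' := if w x = true then st.1 + 1 else 0
        (s', if 3 ≤ s' then st.2 + P2 else st.2)) (s, pen)).2
      = pen + P2 * (cnt w (decide (2 ≤ s)) (decide (1 ≤ s)) l : Nat) := by
  induction l with
  | nil => intro s pen _; simp [cnt]
  | cons a r ih =>
    intro s pen hs
    by_cases ha : w a = true
    · simp only [List.foldl_cons, ha]
      norm_num
      by_cases h3 : 3 ≤ s + 1
      · rw [if_pos h3, ih (s + 1) _ (by omega)]
        have hs2 : 2 ≤ s := by omega
        have hs1 : 1 ≤ s := by omega
        simp only [cnt, ha, hs1, hs2, decide_true, Bool.and_self]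
        have h21 : decide (2 ≤ s + 1) = true := by simp; omega
        have h11 : decide (1 ≤ s + 1) = true := by simp; omega
        rw [h21, h11]
        push_cast; ring
      · rw [if_neg h3, ih (s + 1) _ (by omega)]
        have hs2 : ¬ 2 ≤ s := by omega
        simp only [cnt, ha, hs2, decide_false, Bool.false_and]
        have h21 : decide (2 ≤ s + 1) = decide (1 ≤ s) := by by_cases h : 1 ≤ s <;> simp [h] <;> omega
        have h11 : decide (1 ≤ s + 1) = true := by simp; omega
        rw [h21, h11]
        simp
    · have ha' : w a = false := by simpa using ha
      simp only [List.foldl_cons, ha', Bool.false_eq_true, if_false]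
      rw [if_neg (by norm_num : ¬ (3:Int) ≤ 0), ih 0 pen le_rfl]
      simp only [cnt, ha', Bool.and_false, Bool.false_eq_true, if_false]
      rw [cnt_false_irrel w r (decide (1 ≤ s)) (decide ((1:Int) ≤ 0))]
      simp

-- bridging Python's `and` of memberships to a Bool conjunction
lemma and3_eq_band (a b c : Bool) : ((a = true) ∧ (b = true) ∧ (c = true)) = ((a && b && c) = true) := by
  simp [and_assoc]

-- A's indexed window count equals the structural window count
lemma countP_window (w : Int → Bool) (l : List Int) :
    (List.range l.length).countP
      (fun (i : Nat) => decide ((i : Int) < (l.length : Int) - 2)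
        && (w (l.getD i 0) && w (l.getD (i + 1) 0) && w (l.getD (i + 2) 0)))
      = cntT w l := by
  induction l with
  | nil => simp [cntT]
  | cons a r ih =>
    rw [show (a :: r).length = r.length + 1 from rfl]
    rw [List.range_succ_eq_map, List.countP_cons, List.countP_map]
    have hshift : ∀ i : Nat,
        (((fun (i : Nat) => decide ((i : Int) < ((r.length + 1 : Nat) : Int) - 2)
            && (w ((a :: r).getD i 0) && w ((a :: r).getD (i + 1) 0) && w ((a :: r).getD (i + 2) 0))) ∘ Nat.succ) i)
        = (fun (i : Nat) => decide ((i : Int) < ((r.length : Nat) : Int) - 2)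
            && (w (r.getD i 0) && w (r.getD (i + 1) 0) && w (r.getD (i + 2) 0))) i := by
      intro i
      simp only [Function.comp, Nat.succ_eq_add_one, List.getD_cons_succ]
      congr 1
      simp only [decide_eq_decide]
      push_cast; omega
    rw [funext hshift, ih]
    match r with
    | [] => simp [cntT]
    | [b] => simp [cntT]
    | b :: c :: r' =>
      simp only [cntT, List.getD_cons_succ, List.getD_cons_zero, List.length_cons]
      have hg : (((0 : Nat) : Int) < (((r'.length + 1 + 1 + 1 : Nat)) : Int) - 2) = True := by
        simp; push_cast; omega
      simp only [Nat.cast_zero, hg, decide_true, Bool.true_and]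
      rcases hA : w a <;> rcases hB : w b <;> rcases hC : w c <;> simp [hA, hB, hC] <;>
        rw [if_pos (show (2 : Int) ≤ (r'.length : Int) + 1 + 1 from by push_cast; omega)] <;> omega

-- A's window loop in structural form
lemma loopA (P2 : Int) (w : Int → Bool) (l : List Int) (pen : Int) :
    (PySem.List.pyRange 0 (l.length : Int) 1).foldl
      (fun pen i =>
        if i < (l.length : Int) - 2 then
          if w (PySem.List.pyGetD l i 0) = true ∧ w (PySem.List.pyGetD l (i + 1) 0) = true
              ∧ w (PySem.List.pyGetD l (i + 2) 0) = true then pen + P2 else pen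
        else pen) pen
      = pen + P2 * (cntT w l : Nat) := by
  rw [PySem.List.pyRange_zero_natCast, List.foldl_map]
  have key : ∀ (L : List Nat) (pen : Int),
      L.foldl (fun pen (i : Nat) =>
        if (i : Int) < (l.length : Int) - 2 then
          if w (PySem.List.pyGetD l (i : Int) 0) = true ∧ w (PySem.List.pyGetD l ((i : Int) + 1) 0) = true
              ∧ w (PySem.List.pyGetD l ((i : Int) + 2) 0) = true then pen + P2 else pen
        else pen) pen
      = pen + P2 * (L.countP (fun (i : Nat) => decide ((i : Int) < (l.length : Int) - 2)
          && (w (l.getD i 0) && w (l.getD (i + 1) 0) && w (l.getD (i + 2) 0))) : Nat) := by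
    intro L
    induction L with
    | nil => intro pen; simp
    | cons a r ihr =>
      intro pen
      simp only [List.foldl_cons, List.countP_cons]
      have e0 : PySem.List.pyGetD l (a : Int) 0 = l.getD a 0 := PySem.List.pyGetD_natCast l a 0
      have e1 : PySem.List.pyGetD l ((a : Int) + 1) 0 = l.getD (a + 1) 0 := by
        rw [show ((a : Int) + 1) = ((a + 1 : Nat) : Int) by push_cast; ring]
        exact PySem.List.pyGetD_natCast l (a + 1) 0
      have e2 : PySem.List.pyGetD l ((a : Int) + 2) 0 = l.getD (a + 2) 0 := by
        rw [show ((a : Int) + 2) = ((a + 2 : Nat) : Int) by push_cast; ring]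
        exact PySem.List.pyGetD_natCast l (a + 2) 0
      rw [e0, e1, e2]
      by_cases h1 : (a : Int) < (l.length : Int) - 2 <;>
        by_cases h2 : w (l.getD a 0) = true ∧ w (l.getD (a + 1) 0) = true ∧ w (l.getD (a + 2) 0) = true
      · have hb : (w (l.getD a 0) && w (l.getD (a + 1) 0) && w (l.getD (a + 2) 0)) = true := by
          rw [← and3_eq_band]; exact h2
        simp only [if_pos h1, if_pos h2, ihr, h1, decide_true, hb, Bool.true_and, if_pos rfl]
        push_cast; ring
      · have hb : ¬ (w (l.getD a 0) && w (l.getD (a + 1) 0) && w (l.getD (a + 2) 0)) = true := by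
          rw [← and3_eq_band]; exact h2
        simp only [if_neg h2, ihr, h1, decide_true, Bool.true_and, if_neg hb]
        push_cast; ring
      · have hd : decide ((a : Int) < (l.length : Int) - 2) = false := by simpa using h1
        simp only [if_neg h1, ihr, hd, Bool.false_and, Bool.false_eq_true, if_false] <;> norm_num
      · have hd : decide ((a : Int) < (l.length : Int) - 2) = false := by simpa using h1
        simp only [if_neg h1, ihr, hd, Bool.false_and, Bool.false_eq_true, if_false] <;> norm_num
  rw [key, countP_window]

lemma membership_eq (N x : Int) :
    (x ∈ PySem.List.pyRange 1 (2 * N + 1) 1) = (decide (1 ≤ x ∧ x ≤ 2 * N) = true) := by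
  rw [eq_iff_iff, PySem.List.mem_pyRange_one, decide_eq_true_eq]
  constructor <;> intro h <;> exact ⟨h.1, by omega⟩

-- ===== VERDICT (by name: the statement is the Claim_ definition above) =====
theorem Penalty_Sequence_spec : Claim_equal_Penalty_Sequence := by
  intro Array_ P1 P2 N _ _
  unfold Spec_Penalty_Sequence Penalty_Sequence Penalty_Sequence_alt
  simp only [membership_eq N]
  rw [loopA P2 (fun x => decide (1 ≤ x ∧ x ≤ 2 * N)) Array_,
      loopB P2 (fun x => decide (1 ≤ x ∧ x ≤ 2 * N)) Array_ 0 _ le_rfl,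
      show decide ((2:Int) ≤ 0) = false from rfl,
      show decide ((1:Int) ≤ 0) = false from rfl,
      cnt_start]
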